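-- pv_equiv track=rewrite | github.com/LeeoniIsrael/rent-connect-agent | src/agents/route_planning/agent.py | _find_suitable_window
-- ===== SOURCE A (Python) =====
-- from typing import List, Dict, Any, Tuple, Optional
--
-- def _find_suitable_window(
--
--     desired_time: int,
--     duration: int,
--     time_windows: List[Tuple[int, int]]
-- ) -> int:
--     """Find time window that can accommodate viewing at desired time"""
--     for i, (start, end) in enumerate(time_windows):
--         if desired_time >= start and desired_time + duration <= end:
--             return i
--
--     # Try to fit in next available window
--     for i, (start, end) in enumerate(time_windows):
--         if start >= desired_time and start + duration <= end:
--             return i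
--
--     return -1  # No suitable window
-- ===== SOURCE B (Python) =====
-- def _find_suitable_window(desired_time, duration, time_windows):
--     fallback = -1
--     for i, (start, end) in enumerate(time_windows):
--         if desired_time >= start and desired_time + duration <= end:
--             return i
--         if fallback == -1 and start >= desired_time and start + duration <= end:
--             fallback = i
--     return fallback
-- ===== Notes on version B (the rewrite author's own statement) =====
-- stated objective: simpler
-- what changed: The two separate scans (primary pass, then fallback pass) are merged into one pass that returns immediately on a primary match and records only the first fallback index in a variable returned after the loop.
import Mathlib
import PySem

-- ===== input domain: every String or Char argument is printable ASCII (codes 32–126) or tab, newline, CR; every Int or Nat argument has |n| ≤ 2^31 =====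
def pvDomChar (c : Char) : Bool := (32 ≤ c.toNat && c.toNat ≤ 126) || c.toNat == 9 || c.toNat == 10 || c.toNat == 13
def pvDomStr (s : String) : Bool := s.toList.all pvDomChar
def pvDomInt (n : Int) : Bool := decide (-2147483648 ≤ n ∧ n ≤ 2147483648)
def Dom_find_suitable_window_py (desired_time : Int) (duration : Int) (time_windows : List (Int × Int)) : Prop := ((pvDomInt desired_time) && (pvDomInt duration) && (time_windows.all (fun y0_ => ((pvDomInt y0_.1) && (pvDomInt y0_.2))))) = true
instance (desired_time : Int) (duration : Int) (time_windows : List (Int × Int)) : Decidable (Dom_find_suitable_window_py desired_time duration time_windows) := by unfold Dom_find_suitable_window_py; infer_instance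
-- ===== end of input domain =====

-- B merges A's two scans into a single pass recording the first fallback index (simpler decomposition).


-- ===== PORT A =====
-- first loop: first i with desired_time >= start and desired_time + duration <= end
def pvA_loop1 (desired_time duration : Int) : List (Int × Int) → Int → Option Int
  | [], _ => none
  | (s, e) :: rest, i =>
    if desired_time ≥ s ∧ desired_time + duration ≤ e then some i
    else pvA_loop1 desired_time duration rest (i + 1)

-- second loop: first i with start >= desired_time and start + duration <= end
def pvA_loop2 (desired_time duration : Int) : List (Int × Int) → Int → Option Int
  | [], _ => none
  | (s, e) :: rest, i =>
    if s ≥ desired_time ∧ s + duration ≤ e then some i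
    else pvA_loop2 desired_time duration rest (i + 1)

def find_suitable_window_py (desired_time : Int) (duration : Int) (time_windows : List (Int × Int)) : Int :=
  match pvA_loop1 desired_time duration time_windows 0 with
  | some i => i
  | none =>
    match pvA_loop2 desired_time duration time_windows 0 with
    | some i => i
    | none => -1

-- ===== PORT B =====
-- single pass: return i on a primary match, record the first fallback index, return it at the end
def pvB_loop (desired_time duration : Int) : List (Int × Int) → Int → Int → Int
  | [], _, fallback => fallback
  | (s, e) :: rest, i, fallback =>
    if desired_time ≥ s ∧ desired_time + duration ≤ e then i
    else
      pvB_loop desired_time duration rest (i + 1)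
        (if fallback = -1 ∧ s ≥ desired_time ∧ s + duration ≤ e then i else fallback)

def find_suitable_window_py_alt (desired_time : Int) (duration : Int) (time_windows : List (Int × Int)) : Int :=
  pvB_loop desired_time duration time_windows 0 (-1)

-- ===== PRECONDITION & SPEC =====
def Spec_find_suitable_window_py (desired_time : Int) (duration : Int) (time_windows : List (Int × Int)) (out : Int) : Prop := out = find_suitable_window_py_alt desired_time duration time_windows
instance (desired_time : Int) (duration : Int) (time_windows : List (Int × Int)) (out : Int) : Decidable (Spec_find_suitable_window_py desired_time duration time_windows out) := by unfold Spec_find_suitable_window_py; infer_instance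

-- ===== CLAIM (what is proved, stated in full; the proofs are below) =====
def Claim_equal_find_suitable_window_py : Prop := ∀ (desired_time : Int) (duration : Int) (time_windows : List (Int × Int)), Dom_find_suitable_window_py desired_time duration time_windows → Spec_find_suitable_window_py desired_time duration time_windows (find_suitable_window_py desired_time duration time_windows)

-- ===== LEMMAS AND PROOFS =====
-- Invariant of B's single pass: with a nonnegative running index, the loop returns the first
-- primary index of the remaining list if any; otherwise the stored fallback if already set;
-- otherwise the first fallback index of the remaining list; otherwise -1.
theorem pvB_loop_eq (desired_time duration : Int) (l : List (Int × Int)) :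
    ∀ (i fallback : Int), 0 ≤ i →
      pvB_loop desired_time duration l i fallback =
        (match pvA_loop1 desired_time duration l i with
         | some j => j
         | none =>
           if fallback = -1 then
             (match pvA_loop2 desired_time duration l i with
              | some j => j
              | none => -1)
           else fallback) := by
  induction l with
  | nil => intro i fallback _; simp [pvB_loop, pvA_loop1, pvA_loop2]
  | cons hd rest ih =>
    intro i fallback hi
    obtain ⟨s, e⟩ := hd
    by_cases hp : desired_time ≥ s ∧ desired_time + duration ≤ e
    · simp [pvB_loop, pvA_loop1, hp]
    · by_cases hf : s ≥ desired_time ∧ s + duration ≤ e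
      · by_cases hfb : fallback = -1
        · have : pvB_loop desired_time duration ((s, e) :: rest) i fallback =
              pvB_loop desired_time duration rest (i + 1) i := by
            simp [pvB_loop, hp, hfb, hf]
          rw [this, ih (i + 1) i (by omega)]
          have hne : ¬ (i = -1) := by omega
          simp [pvA_loop1, pvA_loop2, hp, hf, hfb, hne]
        · have : pvB_loop desired_time duration ((s, e) :: rest) i fallback =
              pvB_loop desired_time duration rest (i + 1) fallback := by
            simp [pvB_loop, hp, hfb]
          rw [this, ih (i + 1) fallback (by omega)]
          simp [pvA_loop1, hp, hfb]
      · have : pvB_loop desired_time duration ((s, e) :: rest) i fallback =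
            pvB_loop desired_time duration rest (i + 1) fallback := by
          simp [pvB_loop, hp, hf]
        rw [this, ih (i + 1) fallback (by omega)]
        simp [pvA_loop1, pvA_loop2, hp, hf]

-- ===== VERDICT (by name: the statement is the Claim_ definition above) =====
theorem find_suitable_window_py_spec : Claim_equal_find_suitable_window_py := by
  intro desired_time duration time_windows _
  unfold Spec_find_suitable_window_py find_suitable_window_py find_suitable_window_py_alt
  rw [pvB_loop_eq desired_time duration time_windows 0 (-1) (by omega)]
  simp
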